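-- pv_equiv track=rewrite | github.com/ostamand/color-it-daily-agent | jobs/colorize/main.py | get_style_instruction
-- ===== SOURCE A (Python) =====
-- from typing import List, Optional
--
-- def get_style_instruction(audience: str, mood: str, tags: List[str]) -> str:
--     """
--     Determines the coloring style based on metadata, mirroring the Stylist agent's logic.
--     """
--     audience = audience.lower() if audience else "child"
--     mood = mood.lower() if mood else ""
--     tags = [t.lower() for t in tags] if tags else []
--
--     if audience == "child":
--         # Micro-Style 6: Simple Mosaic (Nature/Patterns)
--         if any(t in tags for t in ["butterfly", "snowflake", "leaf", "abstract"]):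
--             return "Style: Simple Mosaic. Color like a simple stained-glass window. Use bright, distinct colors for each segment."
--
--         # Micro-Style 5: Simple Mandala (Symmetry)
--         if "mandala" in tags or "symmetry" in tags or any(t in tags for t in ["flower", "snowflake"]):
--              return "Style: Simple Mandala. Use a radial symmetrical color palette. Bright and engaging colors suitable for children."
--
--         # Micro-Style 3: Kawaii Pop (Cute)
--         if mood in ["fun", "happy"] or any(t in tags for t in ["cute", "baby", "sweet", "chibi"]):
--             return "Style: Kawaii Pop. Use a pastel and bright color palette. Soft, cute, and happy colors."
--
--         # Micro-Style 4: Dynamic Comic (Action)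
--         if mood in ["energetic", "adventure"] or any(t in tags for t in ["sports", "hero", "vehicle", "car", "train", "plane"]):
--             return "Style: Dynamic Comic. Use bold, vibrant, and saturated colors. High contrast."
--
--         # Micro-Style 2: Whimsical Storybook (Scenes)
--         if mood in ["calm", "dreamy"] or any(t in tags for t in ["nature", "scenery", "forest"]):
--             return "Style: Whimsical Storybook. Use soft, watercolor-like hues. Gentle, warm, and inviting colors."
--
--         # Micro-Style 1: Bold Sticker (Default)
--         return "Style: Bold Sticker. Use high-impact, solid colors. Make the subject pop against the background."
--
--     else: # Adult
--         if any(t in tags for t in ["animal", "nature", "flower"]):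
--             return "Style: Botanical & Organic. Use realistic, naturalistic colors with subtle gradients and blending."
--
--         return "Style: Zen Mandala. Use a sophisticated, harmonious color palette. Relaxing and meditative colors."
-- ===== SOURCE B (Python) =====
-- # Priority-index approach: invert the rule tables into tag->priority and
-- # mood->priority dictionaries, fold a running minimum priority over the tags,
-- # and index the style list by the resulting minimum.
--
-- CHILD_STYLES = [
--     "Style: Simple Mosaic. Color like a simple stained-glass window. Use bright, distinct colors for each segment.",
--     "Style: Simple Mandala. Use a radial symmetrical color palette. Bright and engaging colors suitable for children.",
--     "Style: Kawaii Pop. Use a pastel and bright color palette. Soft, cute, and happy colors.",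
--     "Style: Dynamic Comic. Use bold, vibrant, and saturated colors. High contrast.",
--     "Style: Whimsical Storybook. Use soft, watercolor-like hues. Gentle, warm, and inviting colors.",
--     "Style: Bold Sticker. Use high-impact, solid colors. Make the subject pop against the background.",
-- ]
--
-- CHILD_TAG_PRIO = {
--     "butterfly": 0, "snowflake": 0, "leaf": 0, "abstract": 0,
--     "mandala": 1, "symmetry": 1, "flower": 1,
--     "cute": 2, "baby": 2, "sweet": 2, "chibi": 2,
--     "sports": 3, "hero": 3, "vehicle": 3, "car": 3, "train": 3, "plane": 3,
--     "nature": 4, "scenery": 4, "forest": 4,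
-- }
--
-- CHILD_MOOD_PRIO = {
--     "fun": 2, "happy": 2,
--     "energetic": 3, "adventure": 3,
--     "calm": 4, "dreamy": 4,
-- }
--
-- ADULT_STYLES = [
--     "Style: Botanical & Organic. Use realistic, naturalistic colors with subtle gradients and blending.",
--     "Style: Zen Mandala. Use a sophisticated, harmonious color palette. Relaxing and meditative colors.",
-- ]
--
-- ADULT_TAG_PRIO = {"animal": 0, "nature": 0, "flower": 0}
--
--
-- def get_style_instruction(audience, mood, tags):
--     audience = audience.lower() if audience else "child"
--     mood = mood.lower() if mood else ""
--     tags = [t.lower() for t in tags] if tags else []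
--
--     if audience == "child":
--         styles, tag_prio = CHILD_STYLES, CHILD_TAG_PRIO
--         best = CHILD_MOOD_PRIO.get(mood, len(styles) - 1)
--     else:
--         styles, tag_prio = ADULT_STYLES, ADULT_TAG_PRIO
--         best = len(styles) - 1
--
--     for t in tags:
--         best = min(best, tag_prio.get(t, len(styles) - 1))
--
--     return styles[best]
-- ===== Notes on version B (the rewrite author's own statement) =====
-- stated objective: alternative
-- what changed: Instead of A's hand-written conditional cascade, B inverts the rules into tag->priority and mood->priority dictionaries, computes the minimum triggered priority with a single fold over the tags, and indexes an ordered style list by that minimum.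
import Mathlib
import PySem

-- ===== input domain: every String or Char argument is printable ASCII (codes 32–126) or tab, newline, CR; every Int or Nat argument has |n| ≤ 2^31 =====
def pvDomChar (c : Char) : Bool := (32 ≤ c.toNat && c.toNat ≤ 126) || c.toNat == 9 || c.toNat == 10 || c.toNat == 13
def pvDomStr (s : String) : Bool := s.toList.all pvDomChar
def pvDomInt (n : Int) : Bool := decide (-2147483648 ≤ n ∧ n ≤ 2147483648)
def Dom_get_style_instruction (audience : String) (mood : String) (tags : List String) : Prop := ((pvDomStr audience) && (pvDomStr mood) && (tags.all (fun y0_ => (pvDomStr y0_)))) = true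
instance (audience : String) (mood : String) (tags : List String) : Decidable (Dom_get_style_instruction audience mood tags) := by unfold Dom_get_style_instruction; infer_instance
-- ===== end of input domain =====

-- B inverts A's rule cascade into tag->priority / mood->priority dictionaries,
-- folds a running minimum priority over the tags and indexes a style list by it
-- (objective: alternative structure, same cost).

-- ===== PORT A =====
def get_style_instruction (audience : String) (mood : String) (tags : List String) : String :=
  let audience := if audience == "" then "child" else PySem.Str.lower audience
  let mood := if mood == "" then "" else PySem.Str.lower mood
  let tags := if tags == ([] : List String) then [] else tags.map PySem.Str.lower
  if audience == "child" then
    if ["butterfly", "snowflake", "leaf", "abstract"].any (fun t => tags.contains t) then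
      "Style: Simple Mosaic. Color like a simple stained-glass window. Use bright, distinct colors for each segment."
    else if tags.contains "mandala" || tags.contains "symmetry" || ["flower", "snowflake"].any (fun t => tags.contains t) then
      "Style: Simple Mandala. Use a radial symmetrical color palette. Bright and engaging colors suitable for children."
    else if ["fun", "happy"].contains mood || ["cute", "baby", "sweet", "chibi"].any (fun t => tags.contains t) then
      "Style: Kawaii Pop. Use a pastel and bright color palette. Soft, cute, and happy colors."
    else if ["energetic", "adventure"].contains mood || ["sports", "hero", "vehicle", "car", "train", "plane"].any (fun t => tags.contains t) then
      "Style: Dynamic Comic. Use bold, vibrant, and saturated colors. High contrast."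
    else if ["calm", "dreamy"].contains mood || ["nature", "scenery", "forest"].any (fun t => tags.contains t) then
      "Style: Whimsical Storybook. Use soft, watercolor-like hues. Gentle, warm, and inviting colors."
    else
      "Style: Bold Sticker. Use high-impact, solid colors. Make the subject pop against the background."
  else
    if ["animal", "nature", "flower"].any (fun t => tags.contains t) then
      "Style: Botanical & Organic. Use realistic, naturalistic colors with subtle gradients and blending."
    else
      "Style: Zen Mandala. Use a sophisticated, harmonious color palette. Relaxing and meditative colors."

-- ===== PORT B =====
def pvChildStyles : List String :=
  [ "Style: Simple Mosaic. Color like a simple stained-glass window. Use bright, distinct colors for each segment.",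
    "Style: Simple Mandala. Use a radial symmetrical color palette. Bright and engaging colors suitable for children.",
    "Style: Kawaii Pop. Use a pastel and bright color palette. Soft, cute, and happy colors.",
    "Style: Dynamic Comic. Use bold, vibrant, and saturated colors. High contrast.",
    "Style: Whimsical Storybook. Use soft, watercolor-like hues. Gentle, warm, and inviting colors.",
    "Style: Bold Sticker. Use high-impact, solid colors. Make the subject pop against the background." ]

def pvChildTagPrio : List (String × Nat) :=
  [ ("butterfly", 0), ("snowflake", 0), ("leaf", 0), ("abstract", 0),
    ("mandala", 1), ("symmetry", 1), ("flower", 1),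
    ("cute", 2), ("baby", 2), ("sweet", 2), ("chibi", 2),
    ("sports", 3), ("hero", 3), ("vehicle", 3), ("car", 3), ("train", 3), ("plane", 3),
    ("nature", 4), ("scenery", 4), ("forest", 4) ]

def pvChildMoodPrio : List (String × Nat) :=
  [ ("fun", 2), ("happy", 2), ("energetic", 3), ("adventure", 3), ("calm", 4), ("dreamy", 4) ]

def pvAdultStyles : List String :=
  [ "Style: Botanical & Organic. Use realistic, naturalistic colors with subtle gradients and blending.",
    "Style: Zen Mandala. Use a sophisticated, harmonious color palette. Relaxing and meditative colors." ]

def pvAdultTagPrio : List (String × Nat) := [("animal", 0), ("nature", 0), ("flower", 0)]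

-- dict.get(k, d): first-match lookup in the association list
def pvGetD : List (String × Nat) → String → Nat → Nat
  | [], _, d => d
  | (k, v) :: rest, t, d => if t == k then v else pvGetD rest t d

def get_style_instruction_alt (audience : String) (mood : String) (tags : List String) : String :=
  let audience := if audience == "" then "child" else PySem.Str.lower audience
  let mood := if mood == "" then "" else PySem.Str.lower mood
  let tags := if tags == ([] : List String) then [] else tags.map PySem.Str.lower
  let std : List String × List (String × Nat) × Nat :=
    if audience == "child" then
      (pvChildStyles, pvChildTagPrio, pvGetD pvChildMoodPrio mood (pvChildStyles.length - 1))
    else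
      (pvAdultStyles, pvAdultTagPrio, pvAdultStyles.length - 1)
  let styles := std.1
  let best := tags.foldl (fun b t => min b (pvGetD std.2.1 t (styles.length - 1))) std.2.2
  styles.getD best ""

-- ===== PRECONDITION & SPEC =====
def Spec_get_style_instruction (audience : String) (mood : String) (tags : List String) (out : String) : Prop := out = get_style_instruction_alt audience mood tags
instance (audience : String) (mood : String) (tags : List String) (out : String) : Decidable (Spec_get_style_instruction audience mood tags out) := by unfold Spec_get_style_instruction; infer_instance

-- ===== CLAIM (what is proved, stated in full; the proofs are below) =====
def Claim_equal_get_style_instruction : Prop := ∀ (audience : String) (mood : String) (tags : List String), Dom_get_style_instruction audience mood tags → Spec_get_style_instruction audience mood tags (get_style_instruction audience mood tags)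

-- ===== LEMMAS AND PROOFS =====

-- the folded minimum is ≤ k iff the seed is, or some tag's priority is
theorem pv_foldl_min_le_iff (f : String → Nat) (k : Nat) :
    ∀ (ts : List String) (m0 : Nat),
      (ts.foldl (fun b t => min b (f t)) m0 ≤ k ↔ m0 ≤ k ∨ ∃ t ∈ ts, f t ≤ k) := by
  intro ts
  induction ts with
  | nil => intro m0; simp
  | cons h t ih =>
    intro m0
    simp only [List.foldl_cons, ih, min_le_iff, List.mem_cons]
    constructor
    · rintro (⟨h1 | h1⟩ | ⟨x, hx, hfx⟩)
      · exact Or.inl h1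
      · exact Or.inr ⟨h, Or.inl rfl, h1⟩
      · exact Or.inr ⟨x, Or.inr hx, hfx⟩
    · rintro (h1 | ⟨x, (rfl | hx), hfx⟩)
      · exact Or.inl (Or.inl h1)
      · exact Or.inl (Or.inr hfx)
      · exact Or.inr ⟨x, hx, hfx⟩

-- if every value in the table and the default exceed k, so does the lookup
-- if every value in the table and the default are ≤ k, so is the lookup
theorem pvGetD_le (k d : Nat) (t : String) : ∀ (Q : List (String × Nat)),
    (∀ p ∈ Q, p.2 ≤ k) → d ≤ k → pvGetD Q t d ≤ k := by
  intro Q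
  induction Q with
  | nil => intro _ hd; exact hd
  | cons a rest ih =>
    intro hQ hd
    obtain ⟨ka, va⟩ := a
    simp only [pvGetD]
    split_ifs
    · exact hQ (ka, va) List.mem_cons_self
    · exact ih (fun p hp => hQ p (List.mem_cons_of_mem _ hp)) hd

theorem pvGetD_gt (k d : Nat) (t : String) : ∀ (Q : List (String × Nat)),
    (∀ p ∈ Q, k < p.2) → k < d → k < pvGetD Q t d := by
  intro Q
  induction Q with
  | nil => intro _ hd; exact hd
  | cons a rest ih =>
    intro hQ hd
    obtain ⟨ka, va⟩ := a
    simp only [pvGetD]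
    split_ifs
    · exact hQ (ka, va) List.mem_cons_self
    · exact ih (fun p hp => hQ p (List.mem_cons_of_mem _ hp)) hd

-- if the entries with value ≤ k form a prefix, the lookup is ≤ k iff the key is in that prefix
theorem pvGetD_le_iff (k d : Nat) (t : String) : ∀ (P Q : List (String × Nat)),
    (∀ p ∈ P, p.2 ≤ k) → (∀ p ∈ Q, k < p.2) → k < d →
    (pvGetD (P ++ Q) t d ≤ k ↔ t ∈ P.map Prod.fst) := by
  intro P
  induction P with
  | nil =>
    intro Q _ hQ hd
    simp only [List.nil_append, List.map_nil, List.not_mem_nil, iff_false]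
    have := pvGetD_gt k d t Q hQ hd
    omega
  | cons a rest ih =>
    intro Q hP hQ hd
    obtain ⟨ka, va⟩ := a
    simp only [List.cons_append, pvGetD, List.map_cons, List.mem_cons]
    split_ifs with h
    · simp only [beq_iff_eq] at h
      exact iff_of_true (hP (ka, va) List.mem_cons_self) (Or.inl h)
    · simp only [beq_iff_eq] at h
      rw [ih Q (fun p hp => hP p (List.mem_cons_of_mem _ hp)) hQ hd]
      exact (or_iff_right h).symm

theorem pv_child_le0 (t : String) : pvGetD pvChildTagPrio t 5 ≤ 0 ↔
    (t = "butterfly" ∨ t = "snowflake" ∨ t = "leaf" ∨ t = "abstract") := by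
  rw [show pvChildTagPrio = (pvChildTagPrio.take 4) ++ (pvChildTagPrio.drop 4) from (List.take_append_drop 4 _).symm,
    pvGetD_le_iff 0 5 t _ _ (by decide) (by decide) (by decide)]
  simp [pvChildTagPrio]

theorem pv_child_le1 (t : String) : pvGetD pvChildTagPrio t 5 ≤ 1 ↔
    (t = "butterfly" ∨ t = "snowflake" ∨ t = "leaf" ∨ t = "abstract" ∨
     t = "mandala" ∨ t = "symmetry" ∨ t = "flower") := by
  rw [show pvChildTagPrio = (pvChildTagPrio.take 7) ++ (pvChildTagPrio.drop 7) from (List.take_append_drop 7 _).symm,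
    pvGetD_le_iff 1 5 t _ _ (by decide) (by decide) (by decide)]
  simp [pvChildTagPrio]

theorem pv_child_le2 (t : String) : pvGetD pvChildTagPrio t 5 ≤ 2 ↔
    (t = "butterfly" ∨ t = "snowflake" ∨ t = "leaf" ∨ t = "abstract" ∨
     t = "mandala" ∨ t = "symmetry" ∨ t = "flower" ∨
     t = "cute" ∨ t = "baby" ∨ t = "sweet" ∨ t = "chibi") := by
  rw [show pvChildTagPrio = (pvChildTagPrio.take 11) ++ (pvChildTagPrio.drop 11) from (List.take_append_drop 11 _).symm,
    pvGetD_le_iff 2 5 t _ _ (by decide) (by decide) (by decide)]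
  simp [pvChildTagPrio]

theorem pv_child_le3 (t : String) : pvGetD pvChildTagPrio t 5 ≤ 3 ↔
    (t = "butterfly" ∨ t = "snowflake" ∨ t = "leaf" ∨ t = "abstract" ∨
     t = "mandala" ∨ t = "symmetry" ∨ t = "flower" ∨
     t = "cute" ∨ t = "baby" ∨ t = "sweet" ∨ t = "chibi" ∨
     t = "sports" ∨ t = "hero" ∨ t = "vehicle" ∨ t = "car" ∨ t = "train" ∨ t = "plane") := by
  rw [show pvChildTagPrio = (pvChildTagPrio.take 17) ++ (pvChildTagPrio.drop 17) from (List.take_append_drop 17 _).symm,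
    pvGetD_le_iff 3 5 t _ _ (by decide) (by decide) (by decide)]
  simp [pvChildTagPrio]

theorem pv_child_le4 (t : String) : pvGetD pvChildTagPrio t 5 ≤ 4 ↔
    (t = "butterfly" ∨ t = "snowflake" ∨ t = "leaf" ∨ t = "abstract" ∨
     t = "mandala" ∨ t = "symmetry" ∨ t = "flower" ∨
     t = "cute" ∨ t = "baby" ∨ t = "sweet" ∨ t = "chibi" ∨
     t = "sports" ∨ t = "hero" ∨ t = "vehicle" ∨ t = "car" ∨ t = "train" ∨ t = "plane" ∨
     t = "nature" ∨ t = "scenery" ∨ t = "forest") := by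
  rw [show pvChildTagPrio = pvChildTagPrio ++ [] from (List.append_nil _).symm,
    pvGetD_le_iff 4 5 t _ _ (by decide) (by decide) (by decide)]
  simp [pvChildTagPrio]

theorem pv_mood_ge2 (m : String) : 2 ≤ pvGetD pvChildMoodPrio m 5 :=
  pvGetD_gt 1 5 m pvChildMoodPrio (by decide) (by decide)

theorem pv_mood_le2 (m : String) : pvGetD pvChildMoodPrio m 5 ≤ 2 ↔ (m = "fun" ∨ m = "happy") := by
  rw [show pvChildMoodPrio = (pvChildMoodPrio.take 2) ++ (pvChildMoodPrio.drop 2) from (List.take_append_drop 2 _).symm,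
    pvGetD_le_iff 2 5 m _ _ (by decide) (by decide) (by decide)]
  simp [pvChildMoodPrio]

theorem pv_mood_le3 (m : String) : pvGetD pvChildMoodPrio m 5 ≤ 3 ↔
    (m = "fun" ∨ m = "happy" ∨ m = "energetic" ∨ m = "adventure") := by
  rw [show pvChildMoodPrio = (pvChildMoodPrio.take 4) ++ (pvChildMoodPrio.drop 4) from (List.take_append_drop 4 _).symm,
    pvGetD_le_iff 3 5 m _ _ (by decide) (by decide) (by decide)]
  simp [pvChildMoodPrio]

theorem pv_mood_le4 (m : String) : pvGetD pvChildMoodPrio m 5 ≤ 4 ↔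
    (m = "fun" ∨ m = "happy" ∨ m = "energetic" ∨ m = "adventure" ∨ m = "calm" ∨ m = "dreamy") := by
  rw [show pvChildMoodPrio = pvChildMoodPrio ++ [] from (List.append_nil _).symm,
    pvGetD_le_iff 4 5 m _ _ (by decide) (by decide) (by decide)]
  simp [pvChildMoodPrio]

theorem pv_adult_le0 (t : String) : pvGetD pvAdultTagPrio t 1 ≤ 0 ↔
    (t = "animal" ∨ t = "nature" ∨ t = "flower") := by
  rw [show pvAdultTagPrio = pvAdultTagPrio ++ [] from (List.append_nil _).symm,
    pvGetD_le_iff 0 1 t _ _ (by decide) (by decide) (by decide)]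
  simp [pvAdultTagPrio]

-- the child branch of A equals the child branch of B, for already-normalized mood/tags
set_option maxHeartbeats 1600000 in
theorem pv_child_eq (m : String) (ts : List String) :
    (if ["butterfly", "snowflake", "leaf", "abstract"].any (fun t => ts.contains t) then
      "Style: Simple Mosaic. Color like a simple stained-glass window. Use bright, distinct colors for each segment."
    else if ts.contains "mandala" || ts.contains "symmetry" || ["flower", "snowflake"].any (fun t => ts.contains t) then
      "Style: Simple Mandala. Use a radial symmetrical color palette. Bright and engaging colors suitable for children."
    else if ["fun", "happy"].contains m || ["cute", "baby", "sweet", "chibi"].any (fun t => ts.contains t) then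
      "Style: Kawaii Pop. Use a pastel and bright color palette. Soft, cute, and happy colors."
    else if ["energetic", "adventure"].contains m || ["sports", "hero", "vehicle", "car", "train", "plane"].any (fun t => ts.contains t) then
      "Style: Dynamic Comic. Use bold, vibrant, and saturated colors. High contrast."
    else if ["calm", "dreamy"].contains m || ["nature", "scenery", "forest"].any (fun t => ts.contains t) then
      "Style: Whimsical Storybook. Use soft, watercolor-like hues. Gentle, warm, and inviting colors."
    else
      "Style: Bold Sticker. Use high-impact, solid colors. Make the subject pop against the background.") =
    pvChildStyles.getD (ts.foldl (fun b t => min b (pvGetD pvChildTagPrio t (pvChildStyles.length - 1))) (pvGetD pvChildMoodPrio m (pvChildStyles.length - 1))) "" := by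
  have hlen : pvChildStyles.length - 1 = 5 := by decide
  rw [hlen]
  set r := ts.foldl (fun b t => min b (pvGetD pvChildTagPrio t 5)) (pvGetD pvChildMoodPrio m 5) with hr
  have hle : ∀ k, r ≤ k ↔ (pvGetD pvChildMoodPrio m 5 ≤ k ∨ ∃ t ∈ ts, pvGetD pvChildTagPrio t 5 ≤ k) :=
    fun k => pv_foldl_min_le_iff _ k ts _
  have hr5 : r ≤ 5 := (hle 5).2 (Or.inl (pvGetD_le 5 5 m pvChildMoodPrio (by decide) (by decide)))
  simp only [List.any_cons, List.any_nil, List.contains_eq_mem, List.mem_cons, List.not_mem_nil,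
    Bool.or_false, Bool.or_eq_true, decide_eq_true_eq, or_false]
  by_cases h0 : "butterfly" ∈ ts ∨ "snowflake" ∈ ts ∨ "leaf" ∈ ts ∨ "abstract" ∈ ts
  · have : r ≤ 0 := by
      rw [hle]; right
      rcases h0 with h | h | h | h <;>
        exact ⟨_, h, by rw [pv_child_le0]; decide⟩
    have : r = 0 := by omega
    rw [if_pos h0, this]
    rfl
  · by_cases h1 : ("mandala" ∈ ts ∨ "symmetry" ∈ ts) ∨ ("flower" ∈ ts ∨ "snowflake" ∈ ts)
    · have hub : r ≤ 1 := by
        rw [hle]; right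
        rcases h1 with (h | h) | (h | h) <;>
          exact ⟨_, h, by rw [pv_child_le1]; decide⟩
      have hlb : ¬ r ≤ 0 := by
        rw [hle]
        rintro (hm | ⟨t, ht, hft⟩)
        · have := pv_mood_ge2 m; omega
        · rw [pv_child_le0] at hft
          rcases hft with rfl | rfl | rfl | rfl <;> tauto
      have : r = 1 := by omega
      rw [if_neg h0, if_pos h1, this]
      rfl
    · by_cases h2 : (m = "fun" ∨ m = "happy") ∨ ("cute" ∈ ts ∨ "baby" ∈ ts ∨ "sweet" ∈ ts ∨ "chibi" ∈ ts)
      · have hub : r ≤ 2 := by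
          rw [hle]
          rcases h2 with hm | h
          · exact Or.inl ((pv_mood_le2 m).2 hm)
          · right
            rcases h with h | h | h | h <;>
              exact ⟨_, h, by rw [pv_child_le2]; decide⟩
        have hlb : ¬ r ≤ 1 := by
          rw [hle]
          rintro (hm | ⟨t, ht, hft⟩)
          · have := pv_mood_ge2 m; omega
          · rw [pv_child_le1] at hft
            rcases hft with rfl | rfl | rfl | rfl | rfl | rfl | rfl <;> tauto
        have : r = 2 := by omega
        rw [if_neg h0, if_neg h1, if_pos h2, this]
        rfl
      · by_cases h3 : (m = "energetic" ∨ m = "adventure") ∨ ("sports" ∈ ts ∨ "hero" ∈ ts ∨ "vehicle" ∈ ts ∨ "car" ∈ ts ∨ "train" ∈ ts ∨ "plane" ∈ ts)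
        · have hub : r ≤ 3 := by
            rw [hle]
            rcases h3 with hm | h
            · exact Or.inl ((pv_mood_le3 m).2 (by tauto))
            · right
              rcases h with h | h | h | h | h | h <;>
                exact ⟨_, h, by rw [pv_child_le3]; decide⟩
          have hlb : ¬ r ≤ 2 := by
            rw [hle]
            rintro (hm | ⟨t, ht, hft⟩)
            · rw [pv_mood_le2] at hm; tauto
            · rw [pv_child_le2] at hft
              rcases hft with rfl | rfl | rfl | rfl | rfl | rfl | rfl | rfl | rfl | rfl | rfl <;> tauto
          have : r = 3 := by omega
          rw [if_neg h0, if_neg h1, if_neg h2, if_pos h3, this]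
          rfl
        · by_cases h4 : (m = "calm" ∨ m = "dreamy") ∨ ("nature" ∈ ts ∨ "scenery" ∈ ts ∨ "forest" ∈ ts)
          · have hub : r ≤ 4 := by
              rw [hle]
              rcases h4 with hm | h
              · exact Or.inl ((pv_mood_le4 m).2 (by tauto))
              · right
                rcases h with h | h | h <;>
                  exact ⟨_, h, by rw [pv_child_le4]; decide⟩
            have hlb : ¬ r ≤ 3 := by
              rw [hle]
              rintro (hm | ⟨t, ht, hft⟩)
              · rw [pv_mood_le3] at hm; tauto
              · rw [pv_child_le3] at hft
                rcases hft with rfl | rfl | rfl | rfl | rfl | rfl | rfl | rfl | rfl | rfl | rfl | rfl | rfl | rfl | rfl | rfl | rfl <;> tauto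
            have : r = 4 := by omega
            rw [if_neg h0, if_neg h1, if_neg h2, if_neg h3, if_pos h4, this]
            rfl
          · have hlb : ¬ r ≤ 4 := by
              rw [hle]
              rintro (hm | ⟨t, ht, hft⟩)
              · rw [pv_mood_le4] at hm; tauto
              · rw [pv_child_le4] at hft
                rcases hft with rfl | rfl | rfl | rfl | rfl | rfl | rfl | rfl | rfl | rfl | rfl | rfl | rfl | rfl | rfl | rfl | rfl | rfl | rfl | rfl <;> tauto
            have : r = 5 := by omega
            rw [if_neg h0, if_neg h1, if_neg h2, if_neg h3, if_neg h4, this]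
            rfl

-- the adult branch of A equals the adult branch of B
theorem pv_adult_eq (ts : List String) :
    (if ["animal", "nature", "flower"].any (fun t => ts.contains t) then
      "Style: Botanical & Organic. Use realistic, naturalistic colors with subtle gradients and blending."
    else
      "Style: Zen Mandala. Use a sophisticated, harmonious color palette. Relaxing and meditative colors.") =
    pvAdultStyles.getD (ts.foldl (fun b t => min b (pvGetD pvAdultTagPrio t (pvAdultStyles.length - 1))) (pvAdultStyles.length - 1)) "" := by
  have hlen : pvAdultStyles.length - 1 = 1 := by decide
  rw [hlen]
  set r := ts.foldl (fun b t => min b (pvGetD pvAdultTagPrio t 1)) 1 with hr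
  have hle : ∀ k, r ≤ k ↔ ((1 : Nat) ≤ k ∨ ∃ t ∈ ts, pvGetD pvAdultTagPrio t 1 ≤ k) :=
    fun k => pv_foldl_min_le_iff _ k ts _
  have hr1 : r ≤ 1 := (hle 1).2 (Or.inl le_rfl)
  simp only [List.any_cons, List.any_nil, List.contains_eq_mem, Bool.or_false, Bool.or_eq_true,
    decide_eq_true_eq]
  by_cases h0 : "animal" ∈ ts ∨ "nature" ∈ ts ∨ "flower" ∈ ts
  · have : r ≤ 0 := by
      rw [hle]; right
      rcases h0 with h | h | h <;>
        exact ⟨_, h, by rw [pv_adult_le0]; decide⟩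
    have : r = 0 := by omega
    rw [if_pos h0, this]
    rfl
  · have hlb : ¬ r ≤ 0 := by
      rw [hle]
      rintro (hm | ⟨t, ht, hft⟩)
      · omega
      · rw [pv_adult_le0] at hft
        rcases hft with rfl | rfl | rfl <;> tauto
    have : r = 1 := by omega
    rw [if_neg h0, this]
    rfl

-- ===== VERDICT (by name: the statement is the Claim_ definition above) =====
theorem get_style_instruction_spec : Claim_equal_get_style_instruction := by
  intro audience mood tags _
  unfold Spec_get_style_instruction get_style_instruction get_style_instruction_alt
  by_cases hc : ((if audience == "" then "child" else PySem.Str.lower audience) == "child") = true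
  · simp only [hc, if_true]
    exact pv_child_eq _ _
  · simp only [hc, if_false, Bool.false_eq_true]
    exact pv_adult_eq _
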